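-- pv_equiv track=rewrite | github.com/Challenge-Next-Level/Floyd-Warshall | LeeYooseok/test/Toss 2022 NEXT/4.py | solution
-- ===== SOURCE A (Python) =====
-- def solution(invitationPairs):
--     graph = dict()
--     score = dict()
--     for idx in range(len(invitationPairs)):
--         p, t = invitationPairs[idx][0], invitationPairs[idx][1]
--         if p not in graph.keys():
--             graph[p] = [t]
--             score[p] = [idx, [1]]
--         else:
--             graph[p].append(t)
--             score[p] = [idx, [score[p][0] + 1]]
--
--     for p in graph.keys():
--         score_2, score_3 = 0, 0
--         for p2 in graph[p]:
--             if p2 in graph.keys():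
--                 for p3 in graph[p2]:
--                     if p3 in graph.keys():
--                         score_3 += score[p3][1][0]
--                 score_2 += score[p2][1][0]
--
--         score[p][1].append(score_2)
--         score[p][1].append(score_3)
--
--     for p in score.keys():
--         s1, s2, s3 = score[p][1]
--         score[p][1] = s1 * 10 + s2 * 3 + s3
--     answer = sorted(score.items(), key=lambda x: (x[1][1], x[1][0]), reverse=True)
--     t = list()
--     for a in answer[:3]:
--         t.append(a[0])
--     return t
-- ===== SOURCE B (Python) =====
-- def solution(invitationPairs):
--     # One pass builds children lists and per-node (last_index, base_score);
--     # level-2 sums are then computed once per node and level-3 sums derived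
--     # from the precomputed level-2 values (A instead rescans children and
--     # grandchildren inside a triple nested loop).
--     children = {}
--     meta = {}  # p -> (last index where p invited, base score as A computes it)
--     for idx, pair in enumerate(invitationPairs):
--         p, t = pair[0], pair[1]
--         if p in children:
--             children[p].append(t)
--             meta[p] = (idx, meta[p][0] + 1)
--         else:
--             children[p] = [t]
--             meta[p] = (idx, 1)
--     lvl2 = {p: sum(meta[c][1] for c in cs if c in children)
--             for p, cs in children.items()}
--     lvl3 = {p: sum(lvl2[c] for c in cs if c in lvl2)
--             for p, cs in children.items()}
--     final = [(p, (meta[p][0], meta[p][1] * 10 + lvl2[p] * 3 + lvl3[p]))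
--              for p in children]
--     ranked = sorted(final, key=lambda kv: (kv[1][1], kv[1][0]), reverse=True)
--     return [kv[0] for kv in ranked[:3]]
-- ===== Notes on version B (the rewrite author's own statement) =====
-- stated objective: alternative
-- what changed: A recomputes level-2 sums inside a triple nested loop (for each inviter, for each child, for each grandchild) and patches score lists in place; B computes each node's level-2 sum once per node and derives level-3 sums from those precomputed level-2 values in one further pass, trading A's repeated inner rescans for two dict-comprehension passes (same measured cost on random inputs).
import Mathlib
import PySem

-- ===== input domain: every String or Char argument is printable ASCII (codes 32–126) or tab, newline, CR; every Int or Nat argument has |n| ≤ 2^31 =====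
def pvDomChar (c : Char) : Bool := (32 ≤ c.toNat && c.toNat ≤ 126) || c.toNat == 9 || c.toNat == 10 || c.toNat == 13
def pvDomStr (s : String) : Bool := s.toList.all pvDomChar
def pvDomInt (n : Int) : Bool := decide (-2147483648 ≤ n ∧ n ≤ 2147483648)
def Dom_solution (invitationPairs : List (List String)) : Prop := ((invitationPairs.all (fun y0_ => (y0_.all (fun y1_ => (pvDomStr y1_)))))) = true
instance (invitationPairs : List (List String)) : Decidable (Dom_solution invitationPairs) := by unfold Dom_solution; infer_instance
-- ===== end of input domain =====

-- B replaces A's triple nested loop (per inviter, re-summing children's and grandchildren's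
-- base scores) by per-node level-2 sums computed once and level-3 sums derived from them in
-- one further pass over the edge lists (objective: alternative algorithm, same measured cost).

-- ===== PORT A =====
-- first loop: build graph and score; score[p] = [idx, [prev component + 1]]
def pvA1 (st : PySem.Dict String (List String) × PySem.Dict String (Int × List Int))
    (ix : Int × List String) :
    PySem.Dict String (List String) × PySem.Dict String (Int × List Int) :=
  let p := (PySem.List.pyGet? ix.2 0).getD ""   -- invitationPairs[idx][0] (in range under Pre_)
  let t := (PySem.List.pyGet? ix.2 1).getD ""   -- invitationPairs[idx][1]
  if st.1.contains p = false then
    (st.1.insert p [t], st.2.insert p (ix.1, [1]))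
  else
    (st.1.modify p [] (fun l => l ++ [t]), st.2.insert p (ix.1, [(st.2.getD p (0, [])).1 + 1]))

-- score[q][1][0]
def pvS1Read (sc : PySem.Dict String (Int × List Int)) (q : String) : Int :=
  (PySem.List.pyGet? (sc.getD q (0, [])).2 0).getD 0

-- second loop body: score_2/score_3 for one p, then score[p][1].append(score_2); …append(score_3)
def pvA2 (graph : PySem.Dict String (List String))
    (sc : PySem.Dict String (Int × List Int)) (p : String) :
    PySem.Dict String (Int × List Int) :=
  let s23 := (graph.getD p []).foldl (fun (s : Int × Int) p2 =>
      if graph.contains p2 then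
        (s.1 + pvS1Read sc p2,
         (graph.getD p2 []).foldl (fun s3 p3 =>
            if graph.contains p3 then s3 + pvS1Read sc p3 else s3) s.2)
      else s) (0, 0)
  sc.modify p (0, []) (fun v => (v.1, v.2 ++ [s23.1, s23.2]))

-- third loop body: score[p][1] = s1*10 + s2*3 + s3 (the value's type changes from list to
-- int, so the in-place loop is rendered as rebuilding the dict over score.keys, same order)
def pvA3 (sc : PySem.Dict String (Int × List Int))
    (d : PySem.Dict String (Int × Int)) (p : String) : PySem.Dict String (Int × Int) :=
  let v := sc.getD p (0, [])
  d.insert p (v.1, (PySem.List.pyGet? v.2 0).getD 0 * 10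
    + (PySem.List.pyGet? v.2 1).getD 0 * 3 + (PySem.List.pyGet? v.2 2).getD 0)

def solution (invitationPairs : List (List String)) : List String :=
  let gs := (PySem.List.enumerate invitationPairs 0).foldl pvA1 (PySem.Dict.empty, PySem.Dict.empty)
  let sc := gs.1.keys.foldl (pvA2 gs.1) gs.2
  let final := sc.keys.foldl (pvA3 sc) PySem.Dict.empty
  let answer := PySem.List.sorted2 final.items (fun x => x.2.2) (fun x => x.2.1) true
  (PySem.List.slice answer none (some 3)).foldl (fun t a => t ++ [a.1]) []

-- ===== PORT B =====
-- one pass: children lists plus meta[p] = (last index, base score)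
def pvB1 (st : PySem.Dict String (List String) × PySem.Dict String (Int × Int))
    (ix : Int × List String) :
    PySem.Dict String (List String) × PySem.Dict String (Int × Int) :=
  let p := (PySem.List.pyGet? ix.2 0).getD ""
  let t := (PySem.List.pyGet? ix.2 1).getD ""
  if st.1.contains p then
    (st.1.modify p [] (fun l => l ++ [t]), st.2.insert p (ix.1, (st.2.getD p (0, 0)).1 + 1))
  else
    (st.1.insert p [t], st.2.insert p (ix.1, 1))

def solution_alt (invitationPairs : List (List String)) : List String :=
  let cm := (PySem.List.enumerate invitationPairs 0).foldl pvB1 (PySem.Dict.empty, PySem.Dict.empty)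
  let children := cm.1
  let mta := cm.2
  let lvl2 : PySem.Dict String Int := PySem.Dict.mk (children.items.map (fun pc =>
      (pc.1, ((pc.2.filter (fun c => children.contains c)).map
        (fun c => (mta.getD c (0, 0)).2)).sum)))
  let lvl3 : PySem.Dict String Int := PySem.Dict.mk (children.items.map (fun pc =>
      (pc.1, ((pc.2.filter (fun c => lvl2.contains c)).map (fun c => lvl2.getD c 0)).sum)))
  let final := children.keys.map (fun p =>
      (p, ((mta.getD p (0, 0)).1,
           (mta.getD p (0, 0)).2 * 10 + lvl2.getD p 0 * 3 + lvl3.getD p 0)))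
  let ranked := PySem.List.sorted2 final (fun x => x.2.2) (fun x => x.2.1) true
  (PySem.List.slice ranked none (some 3)).map (fun kv => kv.1)

-- ===== PRECONDITION & SPEC =====
-- Pre_ excludes exactly the inputs where Python A raises IndexError: an inner list with
-- fewer than 2 elements (A reads pair[0] and pair[1]).
def Pre_solution (invitationPairs : List (List String)) : Prop :=
  ∀ l ∈ invitationPairs, 2 ≤ l.length
instance (invitationPairs : List (List String)) : Decidable (Pre_solution invitationPairs) := by
  unfold Pre_solution; infer_instance
def pvWitness_solution : List (List String) := [["a", "b"], ["b", "c"], ["a", "d"]]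
def Spec_solution (invitationPairs : List (List String)) (out : List String) : Prop := out = solution_alt invitationPairs
instance (invitationPairs : List (List String)) (out : List String) : Decidable (Spec_solution invitationPairs out) := by unfold Spec_solution; infer_instance

-- ===== CLAIM (what is proved, stated in full; the proofs are below) =====
def Claim_equal_solution : Prop := ∀ (invitationPairs : List (List String)), Dom_solution invitationPairs → Pre_solution invitationPairs → Spec_solution invitationPairs (solution invitationPairs)

-- ===== LEMMAS AND PROOFS =====

-- value-mapped dict
def pvMapVals {ν ν' : Type} (h : ν → ν') (d : PySem.Dict String ν) : PySem.Dict String ν' :=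
  PySem.Dict.mk (d.items.map (fun pv => (pv.1, h pv.2)))

theorem pv_get?_mapVals {ν ν' : Type} (h : ν → ν') (d : PySem.Dict String ν) (k : String) :
    (pvMapVals h d).get? k = (d.get? k).map h := by
  obtain ⟨l⟩ := d
  induction l with
  | nil => simp [pvMapVals, PySem.Dict.get?]
  | cons x xs ih =>
    obtain ⟨k1, v1⟩ := x
    simp only [pvMapVals, List.map_cons, PySem.Dict.get?_mk_cons] at *
    by_cases hx : k1 == k <;> simp [hx, ih]

theorem pv_keys_mapVals {ν ν' : Type} (h : ν → ν') (d : PySem.Dict String ν) :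
    (pvMapVals h d).keys = d.keys := by
  simp [pvMapVals, PySem.Dict.keys, List.map_map, Function.comp]

theorem pv_contains_mapVals {ν ν' : Type} (h : ν → ν') (d : PySem.Dict String ν) (k : String) :
    (pvMapVals h d).contains k = d.contains k := by
  rw [PySem.Dict.contains_eq_isSome_get?, PySem.Dict.contains_eq_isSome_get?, pv_get?_mapVals]
  cases d.get? k <;> rfl

theorem pv_insert_mapVals {ν ν' : Type} (h : ν → ν') (d : PySem.Dict String ν) (k : String) (v : ν) :
    pvMapVals h (d.insert k v) = (pvMapVals h d).insert k (h v) := by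
  apply PySem.Dict.ext
  rw [show (pvMapVals h (d.insert k v)).items = (d.insert k v).items.map (fun pv => (pv.1, h pv.2)) from rfl,
    PySem.Dict.items_insert, PySem.Dict.items_insert, pv_contains_mapVals]
  by_cases hc : d.contains k
  · simp only [hc, if_true]
    show ((d.items.map _).map _) = (d.items.map _).map _
    rw [List.map_map, List.map_map]
    refine List.map_congr_left (fun p _ => ?_)
    by_cases hp : p.1 == k <;> simp [Function.comp, hp]
  · simp [hc, pvMapVals]

def pvF (v : Int × Int) : Int × List Int := (v.1, [v.2])

-- pass 1: A's (graph, score) is B's (children, meta) with meta values boxed into singleton lists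
theorem pv_pass1 (l : List (Int × List String)) (g : PySem.Dict String (List String))
    (m : PySem.Dict String (Int × Int)) :
    l.foldl pvA1 (g, pvMapVals pvF m) =
      ((l.foldl pvB1 (g, m)).1, pvMapVals pvF (l.foldl pvB1 (g, m)).2) := by
  induction l generalizing g m with
  | nil => rfl
  | cons x xs ih =>
    simp only [List.foldl_cons]
    have hg : ∀ p, ((pvMapVals pvF m).getD p (0, ([] : List Int))).1 = (m.getD p (0, 0)).1 := by
      intro p
      rw [PySem.Dict.getD_eq_get?_getD, PySem.Dict.getD_eq_get?_getD, pv_get?_mapVals]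
      cases m.get? p <;> rfl
    have hstep : pvA1 (g, pvMapVals pvF m) x = ((pvB1 (g, m) x).1, pvMapVals pvF (pvB1 (g, m) x).2) := by
      simp only [pvA1, pvB1]
      cases hc : g.contains ((PySem.List.pyGet? x.2 0).getD "") with
      | true => simp [hg, pv_insert_mapVals]; rfl
      | false => simp [pv_insert_mapVals]; rfl
    rw [hstep, ih]

theorem pvB1_true (g : PySem.Dict String (List String)) (m : PySem.Dict String (Int × Int))
    (x : Int × List String) (h : g.contains ((PySem.List.pyGet? x.2 0).getD "") = true) :
    pvB1 (g, m) x =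
      (g.modify ((PySem.List.pyGet? x.2 0).getD "") []
          (fun l => l ++ [(PySem.List.pyGet? x.2 1).getD ""]),
       m.insert ((PySem.List.pyGet? x.2 0).getD "")
          (x.1, (m.getD ((PySem.List.pyGet? x.2 0).getD "") (0, 0)).1 + 1)) := by
  simp [pvB1, h]

theorem pvB1_false (g : PySem.Dict String (List String)) (m : PySem.Dict String (Int × Int))
    (x : Int × List String) (h : g.contains ((PySem.List.pyGet? x.2 0).getD "") = false) :
    pvB1 (g, m) x =
      (g.insert ((PySem.List.pyGet? x.2 0).getD "") [(PySem.List.pyGet? x.2 1).getD ""],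
       m.insert ((PySem.List.pyGet? x.2 0).getD "") (x.1, 1)) := by
  simp [pvB1, h]

-- pass 1 keeps the two key lists equal and duplicate-free
theorem pv_keys_inv (l : List (Int × List String)) (g : PySem.Dict String (List String))
    (m : PySem.Dict String (Int × Int)) (he : g.keys = m.keys) (hn : g.keys.Nodup) :
    (l.foldl pvB1 (g, m)).1.keys = (l.foldl pvB1 (g, m)).2.keys ∧
      (l.foldl pvB1 (g, m)).1.keys.Nodup := by
  induction l generalizing g m with
  | nil => exact ⟨he, hn⟩
  | cons x xs ih =>
    simp only [List.foldl_cons]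
    cases hc : g.contains ((PySem.List.pyGet? x.2 0).getD "") with
    | true =>
      have hm : m.contains ((PySem.List.pyGet? x.2 0).getD "") = true := by
        rw [PySem.Dict.contains_iff_mem_keys] at hc ⊢; rw [← he]; exact hc
      rw [pvB1_true _ _ _ hc]
      refine ih _ _ ?_ ?_
      · rw [PySem.Dict.keys_modify, PySem.Dict.keys_insert_of_contains _ _ hc,
          PySem.Dict.keys_insert_of_contains _ _ hm, he]
      · rw [PySem.Dict.keys_modify, PySem.Dict.keys_insert_of_contains _ _ hc]
        exact hn
    | false =>
      have hm : m.contains ((PySem.List.pyGet? x.2 0).getD "") = false := by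
        rw [PySem.Dict.contains_eq_decide_mem_keys] at hc ⊢; rw [← he]; exact hc
      rw [pvB1_false _ _ _ hc]
      refine ih _ _ ?_ ?_
      · rw [PySem.Dict.keys_insert_of_not_contains _ _ hc,
          PySem.Dict.keys_insert_of_not_contains _ _ hm, he]
      · rw [PySem.Dict.keys_insert_of_not_contains _ _ hc]
        refine List.Nodup.append hn (List.nodup_singleton _) ?_
        intro a ha hb
        simp only [List.mem_singleton] at hb
        subst hb
        rw [PySem.Dict.contains_eq_decide_mem_keys] at hc
        simp only [decide_eq_false_iff_not] at hc
        exact hc ha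

def pvSumIf (g : PySem.Dict String (List String)) (f : String → Int) (cs : List String) : Int :=
  ((cs.filter (fun c => g.contains c)).map f).sum

def pvL2 (g : PySem.Dict String (List String)) (s1 : String → Int) (q : String) : Int :=
  pvSumIf g s1 (g.getD q [])

def pvL3 (g : PySem.Dict String (List String)) (s1 : String → Int) (q : String) : Int :=
  pvSumIf g (fun c => pvL2 g s1 c) (g.getD q [])

theorem pv_foldl_if_add (cs : List String) (c : String → Bool) (f : String → Int) (a : Int) :
    cs.foldl (fun s x => if c x then s + f x else s) a = a + ((cs.filter c).map f).sum := by
  induction cs generalizing a with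
  | nil => simp
  | cons x xs ih =>
    by_cases hx : c x
    · simp only [List.foldl_cons, hx, if_true, List.filter_cons_of_pos hx, List.map_cons,
        List.sum_cons, ih]
      ring
    · simp only [List.foldl_cons, hx, if_false, List.filter_cons_of_neg hx, ih, Bool.false_eq_true]

theorem pv_s23_eval (graph : PySem.Dict String (List String))
    (sc : PySem.Dict String (Int × List Int)) (s1 : String → Int)
    (hs1 : ∀ q, pvS1Read sc q = s1 q) (cs : List String) (a b : Int) :
    cs.foldl (fun (s : Int × Int) p2 =>
      if graph.contains p2 then
        (s.1 + pvS1Read sc p2,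
         (graph.getD p2 []).foldl (fun s3 p3 =>
            if graph.contains p3 then s3 + pvS1Read sc p3 else s3) s.2)
      else s) (a, b) =
      (a + pvSumIf graph s1 cs, b + pvSumIf graph (fun c => pvL2 graph s1 c) cs) := by
  induction cs generalizing a b with
  | nil => simp [pvSumIf]
  | cons x xs ih =>
    have hfun : pvS1Read sc = s1 := funext hs1
    simp only [List.foldl_cons]
    by_cases hx : graph.contains x
    · rw [if_pos hx, pv_foldl_if_add, ih]
      simp only [hfun, pvSumIf, pvL2, List.filter_cons_of_pos hx, List.map_cons, List.sum_cons,
        Prod.mk.injEq]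
      constructor <;> ring
    · rw [if_neg hx, ih]
      simp only [pvSumIf, List.filter_cons_of_neg hx]

theorem pv_pyGet?_zero_append (l l' : List Int) (h : l ≠ []) :
    PySem.List.pyGet? (l ++ l') 0 = PySem.List.pyGet? l 0 := by
  cases l with
  | nil => exact absurd rfl h
  | cons x xs =>
    simp [PySem.List.pyGet?, PySem.List.pyIdx?,
      show (0:Int) ≤ (xs.length:Int) + l'.length by positivity]

-- phase 2: folding pvA2 over distinct keys appends [score_2, score_3] to each key's list
theorem pv_phase2 (graph : PySem.Dict String (List String)) (s1 : String → Int)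
    (ks : List String) (sc : PySem.Dict String (Int × List Int))
    (hnd : ks.Nodup) (hmem : ∀ q ∈ ks, sc.contains q = true)
    (hne : ∀ q, sc.contains q = true → (sc.getD q (0, [])).2 ≠ [])
    (hs1 : ∀ q, pvS1Read sc q = s1 q) :
    (ks.foldl (pvA2 graph) sc).keys = sc.keys ∧
      ∀ q, (ks.foldl (pvA2 graph) sc).getD q (0, []) =
        if q ∈ ks then
          ((sc.getD q (0, [])).1, (sc.getD q (0, [])).2 ++ [pvL2 graph s1 q, pvL3 graph s1 q])
        else sc.getD q (0, []) := by
  induction ks generalizing sc with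
  | nil => exact ⟨rfl, fun q => by simp⟩
  | cons p ks ih =>
    have hp : sc.contains p = true := hmem p (List.mem_cons_self)
    have hpne : (sc.getD p (0, [])).2 ≠ [] := hne p hp
    have hstep : pvA2 graph sc p =
        sc.modify p (0, []) (fun v => (v.1, v.2 ++ [pvL2 graph s1 p, pvL3 graph s1 p])) := by
      simp only [pvA2, pv_s23_eval graph sc s1 hs1, zero_add]
      rfl
    have hkeys' : (sc.modify p (0, [])
        (fun v => (v.1, v.2 ++ [pvL2 graph s1 p, pvL3 graph s1 p]))).keys = sc.keys := by
      rw [PySem.Dict.keys_modify, PySem.Dict.keys_insert_of_contains _ _ hp]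
    have hgetD' : ∀ q, (sc.modify p (0, [])
        (fun v => (v.1, v.2 ++ [pvL2 graph s1 p, pvL3 graph s1 p]))).getD q (0, []) =
        if q = p then
          ((sc.getD p (0, [])).1, (sc.getD p (0, [])).2 ++ [pvL2 graph s1 p, pvL3 graph s1 p])
        else sc.getD q (0, []) := by
      intro q
      rw [PySem.Dict.getD_modify]
    have hcont' : ∀ q, (sc.modify p (0, [])
        (fun v => (v.1, v.2 ++ [pvL2 graph s1 p, pvL3 graph s1 p]))).contains q =
        sc.contains q := by
      intro q
      rw [PySem.Dict.contains_eq_decide_mem_keys, PySem.Dict.contains_eq_decide_mem_keys, hkeys']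
    have hs1' : ∀ q, pvS1Read (sc.modify p (0, [])
        (fun v => (v.1, v.2 ++ [pvL2 graph s1 p, pvL3 graph s1 p]))) q = s1 q := by
      intro q
      by_cases hq : q = p
      · subst hq
        unfold pvS1Read
        rw [hgetD' q, if_pos rfl]
        show (PySem.List.pyGet? ((sc.getD q (0, [])).2 ++ [_, _]) 0).getD 0 = s1 q
        rw [pv_pyGet?_zero_append _ _ hpne]
        exact hs1 q
      · unfold pvS1Read
        rw [hgetD' q, if_neg hq]
        exact hs1 q
    have hne' : ∀ q, (sc.modify p (0, [])
        (fun v => (v.1, v.2 ++ [pvL2 graph s1 p, pvL3 graph s1 p]))).contains q = true →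
        ((sc.modify p (0, [])
          (fun v => (v.1, v.2 ++ [pvL2 graph s1 p, pvL3 graph s1 p]))).getD q (0, [])).2 ≠ [] := by
      intro q hq
      rw [hgetD']
      by_cases hqp : q = p
      · simp [hqp]
      · rw [if_neg hqp]
        exact hne q (by rw [← hcont' q]; exact hq)
    have hmem' : ∀ q ∈ ks, (sc.modify p (0, [])
        (fun v => (v.1, v.2 ++ [pvL2 graph s1 p, pvL3 graph s1 p]))).contains q = true := by
      intro q hq
      rw [hcont']
      exact hmem q (List.mem_cons_of_mem _ hq)
    obtain ⟨hk, hv⟩ := ih _ hnd.of_cons hmem' hne' hs1'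
    have hnp : p ∉ ks := (List.nodup_cons.mp hnd).1
    constructor
    · simp only [List.foldl_cons, hstep]
      exact hk.trans hkeys'
    · intro q
      simp only [List.foldl_cons, hstep]
      rw [hv q]
      by_cases hq : q = p
      · subst hq
        rw [if_neg hnp, hgetD' q, if_pos rfl, if_pos (List.mem_cons_self)]
      · by_cases hq2 : q ∈ ks
        · rw [if_pos hq2, hgetD' q, if_neg hq, if_pos (List.mem_cons_of_mem _ hq2)]
        · rw [if_neg hq2, hgetD' q, if_neg hq, if_neg (by simp [hq, hq2])]

theorem pv_get?_mk_map {ν : Type} (ks : List String) (g : String → ν) (p : String) :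
    (PySem.Dict.mk (ks.map (fun k => (k, g k)))).get? p =
      if p ∈ ks then some (g p) else none := by
  induction ks with
  | nil => simp [PySem.Dict.get?]
  | cons x xs ih =>
    simp only [List.map_cons, PySem.Dict.get?_mk_cons, ih, List.mem_cons]
    by_cases hx : x == p
    · simp [show p = x from (beq_iff_eq.mp hx).symm]
    · have : ¬ p = x := fun h => by simp [h] at hx
      simp [hx, this]

theorem pv_main (ips : List (List String)) : solution ips = solution_alt ips := by
  obtain ⟨hkeq, hknd⟩ := pv_keys_inv (PySem.List.enumerate ips 0) PySem.Dict.empty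
    PySem.Dict.empty rfl PySem.Dict.nodup_keys_empty
  simp only [solution, solution_alt]
  set cm := (PySem.List.enumerate ips 0).foldl pvB1 (PySem.Dict.empty, PySem.Dict.empty) with hcm
  set s1 : String → Int := fun q => ((cm.2).getD q (0, 0)).2 with hs1def
  -- pass 1
  have hempty : pvMapVals pvF (PySem.Dict.empty : PySem.Dict String (Int × Int)) = PySem.Dict.empty := rfl
  have h1 : (PySem.List.enumerate ips 0).foldl pvA1 (PySem.Dict.empty, PySem.Dict.empty)
      = (cm.1, pvMapVals pvF cm.2) := by
    rw [← hempty, pv_pass1, hcm]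
  rw [h1]
  set L2D := PySem.Dict.mk (cm.1.items.map (fun pc => (pc.1,
      ((pc.2.filter (fun c => cm.1.contains c)).map s1).sum))) with hL2D
  set L3D := PySem.Dict.mk (cm.1.items.map (fun pc => (pc.1,
      ((pc.2.filter (fun c => L2D.contains c)).map (fun c => L2D.getD c 0)).sum))) with hL3D
  -- phase 2 facts
  have hget0 : ∀ q, (pvMapVals pvF cm.2).get? q = (cm.2.get? q).map pvF :=
    fun q => pv_get?_mapVals _ _ _
  have hs1_0 : ∀ q, pvS1Read (pvMapVals pvF cm.2) q = s1 q := by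
    intro q
    unfold pvS1Read
    rw [PySem.Dict.getD_eq_get?_getD, hget0, hs1def]
    cases h : cm.2.get? q with
    | none => simp [PySem.List.pyGet?, PySem.List.pyIdx?, PySem.Dict.getD_eq_get?_getD, h]
    | some v => simp [PySem.List.pyGet?, PySem.List.pyIdx?, PySem.Dict.getD_eq_get?_getD, h, pvF]
  have hne0 : ∀ q, (pvMapVals pvF cm.2).contains q = true →
      ((pvMapVals pvF cm.2).getD q (0, [])).2 ≠ [] := by
    intro q hq
    rw [PySem.Dict.contains_eq_isSome_get?, hget0] at hq
    cases h : cm.2.get? q with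
    | none => rw [h] at hq; simp at hq
    | some v =>
      rw [PySem.Dict.getD_eq_get?_getD, hget0, h]
      simp [pvF]
  have hmem0 : ∀ q ∈ cm.1.keys, (pvMapVals pvF cm.2).contains q = true := by
    intro q hq
    rw [PySem.Dict.contains_iff_mem_keys, pv_keys_mapVals, ← hkeq]
    exact hq
  obtain ⟨hk2, hv2⟩ := pv_phase2 cm.1 s1 cm.1.keys (pvMapVals pvF cm.2) hknd hmem0 hne0 hs1_0
  set sc2 := cm.1.keys.foldl (pvA2 cm.1) (pvMapVals pvF cm.2) with hsc2
  have hsc2keys : sc2.keys = cm.1.keys := by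
    rw [hk2, pv_keys_mapVals, hkeq]
  have hsc2nd : sc2.keys.Nodup := by rw [hsc2keys]; exact hknd
  have hsc2get : ∀ q ∈ cm.1.keys, sc2.getD q (0, []) =
      ((cm.2.getD q (0, 0)).1, [s1 q, pvL2 cm.1 s1 q, pvL3 cm.1 s1 q]) := by
    intro q hq
    rw [hv2 q, if_pos hq]
    have hqm : q ∈ cm.2.keys := by rw [← hkeq]; exact hq
    have hcq : (cm.2.get? q).isSome := by
      rw [← PySem.Dict.contains_eq_isSome_get?, PySem.Dict.contains_iff_mem_keys]
      exact hqm
    obtain ⟨v, hv⟩ := Option.isSome_iff_exists.mp hcq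
    rw [PySem.Dict.getD_eq_get?_getD, hget0, hv, PySem.Dict.getD_of_get?_eq_some _ _ hv, hs1def]
    simp [pvF, PySem.Dict.getD_of_get?_eq_some _ _ hv]
  -- phase 3: A's final dict as a map over the keys
  have hA3 : (sc2.keys.foldl (pvA3 sc2) PySem.Dict.empty).items =
      sc2.keys.map (fun p => (p, ((sc2.getD p (0, [])).1,
        (PySem.List.pyGet? (sc2.getD p (0, [])).2 0).getD 0 * 10
        + (PySem.List.pyGet? (sc2.getD p (0, [])).2 1).getD 0 * 3
        + (PySem.List.pyGet? (sc2.getD p (0, [])).2 2).getD 0))) := by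
    have hfresh : ∀ a ∈ sc2.keys,
        (PySem.Dict.empty : PySem.Dict String (Int × Int)).contains ((fun a => a) a) = false := by
      intro a _
      simp [PySem.Dict.contains_empty]
    have := PySem.Dict.items_foldl_insert_fresh sc2.keys (fun a => a)
      (fun p => ((sc2.getD p (0, [])).1,
        (PySem.List.pyGet? (sc2.getD p (0, [])).2 0).getD 0 * 10
        + (PySem.List.pyGet? (sc2.getD p (0, [])).2 1).getD 0 * 3
        + (PySem.List.pyGet? (sc2.getD p (0, [])).2 2).getD 0))
      PySem.Dict.empty hfresh (by simpa using hsc2nd)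
    simpa [pvA3] using this
  have hAitems : (sc2.keys.foldl (pvA3 sc2) PySem.Dict.empty).items =
      cm.1.keys.map (fun p => (p, ((cm.2.getD p (0, 0)).1,
        s1 p * 10 + pvL2 cm.1 s1 p * 3 + pvL3 cm.1 s1 p))) := by
    rw [hA3, hsc2keys]
    refine List.map_congr_left (fun p hp => ?_)
    rw [hsc2get p hp]
    simp [PySem.List.pyGet?, PySem.List.pyIdx?]
  -- B's level-2 dict
  have hBitems2 : cm.1.items.map (fun pc => (pc.1,
      ((pc.2.filter (fun c => cm.1.contains c)).map s1).sum)) =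
      cm.1.keys.map (fun k => (k, pvL2 cm.1 s1 k)) := by
    rw [PySem.Dict.items_eq_map_keys cm.1 hknd ([] : List String), List.map_map]
    rfl
  have hlvl2get : ∀ p, L2D.get? p = if p ∈ cm.1.keys then some (pvL2 cm.1 s1 p) else none := by
    intro p
    rw [hL2D, hBitems2]
    exact pv_get?_mk_map _ _ _
  have hlvl2getD : ∀ p ∈ cm.1.keys, L2D.getD p 0 = pvL2 cm.1 s1 p := by
    intro p hp
    rw [PySem.Dict.getD_eq_get?_getD, hlvl2get, if_pos hp]
    rfl
  have hlvl2cont : ∀ p, L2D.contains p = cm.1.contains p := by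
    intro p
    rw [PySem.Dict.contains_eq_isSome_get?, hlvl2get, PySem.Dict.contains_eq_decide_mem_keys]
    by_cases hp : p ∈ cm.1.keys <;> simp [hp]
  -- B's level-3 dict
  have hBitems3 : cm.1.items.map (fun pc => (pc.1,
      ((pc.2.filter (fun c => L2D.contains c)).map (fun c => L2D.getD c 0)).sum)) =
      cm.1.keys.map (fun k => (k, pvL3 cm.1 s1 k)) := by
    rw [PySem.Dict.items_eq_map_keys cm.1 hknd ([] : List String), List.map_map]
    refine List.map_congr_left (fun k hk => ?_)
    simp only [Function.comp]
    rw [List.filter_congr (fun c _ => hlvl2cont c)]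
    have hmapeq : ∀ c ∈ (cm.1.getD k []).filter (fun c => cm.1.contains c),
        L2D.getD c 0 = pvL2 cm.1 s1 c := by
      intro c hc
      have hcmem : c ∈ cm.1.keys := by
        have := List.of_mem_filter hc
        rwa [PySem.Dict.contains_eq_decide_mem_keys, decide_eq_true_eq] at this
      exact hlvl2getD c hcmem
    rw [List.map_congr_left hmapeq]
    rfl
  have hlvl3getD : ∀ p ∈ cm.1.keys, L3D.getD p 0 = pvL3 cm.1 s1 p := by
    intro p hp
    rw [hL3D, hBitems3, PySem.Dict.getD_eq_get?_getD, pv_get?_mk_map, if_pos hp]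
    rfl
  -- B's final pre-sort list equals A's
  rw [hAitems, PySem.List.foldl_append_singleton_eq_map (fun (a : String × Int × Int) => a.1)]
  simp only [List.nil_append]
  refine congrArg (fun l => (PySem.List.slice (PySem.List.sorted2 l
      (fun x : String × Int × Int => x.2.2) (fun x => x.2.1) true) none (some 3)).map
      (fun kv => kv.1)) ?_
  refine List.map_congr_left (fun p hp => ?_)
  rw [hlvl2getD p hp, hlvl3getD p hp]

-- ===== VERDICT (by name: the statement is the Claim_ definition above) =====
theorem solution_spec : Claim_equal_solution := by
  intro ips _ _
  exact pv_main ips
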